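-- pv_equiv track=rewrite | github.com/dianamonea/Shannon-production-schedule | learning_guided_mapf_dataset.py | generate_warehouse
-- ===== SOURCE A (Python) =====
-- from typing import List, Tuple, Optional, Dict
--
-- def generate_warehouse(width: int, height: int, aisle_width: int = 3, shelf_width: int = 2) -> List[List[int]]:
--     """生成仓库地图"""
--     grid = [[0] * width for _ in range(height)]
--
--     # 添加货架
--     period = aisle_width + shelf_width
--     for j in range(aisle_width, width - aisle_width, period):
--         for i in range(aisle_width, height - aisle_width):
--             for dj in range(shelf_width):
--                 if j + dj < width:
--                     grid[i][j + dj] = 1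
--
--         # 每隔一段距离添加通道
--         for i in range(aisle_width + 5, height - aisle_width, 10):
--             for dj in range(shelf_width):
--                 if j + dj < width and i < height:
--                     grid[i][j + dj] = 0
--
--     return grid
-- ===== SOURCE B (Python) =====
-- from typing import List
--
-- def generate_warehouse(width: int, height: int, aisle_width: int = 3, shelf_width: int = 2) -> List[List[int]]:
--     """Single pass: build one shelf-row template from a shelf-column set, then emit each row
--     once (template copy or zero row) from a closed-form row predicate — no overwriting."""
--     period = aisle_width + shelf_width
--     template = []
--     if aisle_width < height - aisle_width:  # at least one shelf row exists
--         shelf_cols = set()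
--         for j in range(aisle_width, width - aisle_width, period):
--             shelf_cols.update(range(j, min(j + shelf_width, width)))
--         template = [1 if j in shelf_cols else 0 for j in range(width)]
--     def shelf_row(i: int) -> bool:
--         return (aisle_width <= i < height - aisle_width
--                 and not (i >= aisle_width + 5 and (i - (aisle_width + 5)) % 10 == 0))
--     return [template[:] if shelf_row(i) else [0] * width for i in range(height)]
-- ===== Notes on version B (the rewrite author's own statement) =====
-- stated objective: alternative
-- what changed: A fills a zero grid and then mutates it twice per shelf block (paint shelves 1, then overwrite cross-aisle rows back to 0); B never mutates: it precomputes the shelf-column set once, renders a single shelf-row template, and emits every row once from a closed-form row predicate (template copy or zero row).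
import Mathlib
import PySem

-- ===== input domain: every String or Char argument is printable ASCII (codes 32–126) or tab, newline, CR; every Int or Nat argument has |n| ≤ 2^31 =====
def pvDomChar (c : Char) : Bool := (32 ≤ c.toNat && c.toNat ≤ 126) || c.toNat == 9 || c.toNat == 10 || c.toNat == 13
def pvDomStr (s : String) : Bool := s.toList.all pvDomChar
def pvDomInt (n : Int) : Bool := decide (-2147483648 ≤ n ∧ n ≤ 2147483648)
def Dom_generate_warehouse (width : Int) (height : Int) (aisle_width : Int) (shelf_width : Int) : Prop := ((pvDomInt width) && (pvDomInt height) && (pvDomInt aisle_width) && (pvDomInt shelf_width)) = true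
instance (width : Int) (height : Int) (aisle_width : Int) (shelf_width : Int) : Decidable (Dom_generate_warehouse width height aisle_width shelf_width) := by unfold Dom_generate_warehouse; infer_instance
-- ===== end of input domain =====

-- B replaces A's fill-then-overwrite mutation with a single pass assigning each cell its
-- final value once (alternative decomposition; same asymptotic cost).

-- ===== PORT A =====
-- grid[i][c] = v  (exact when 0 ≤ i < len(grid) and 0 ≤ c < len(grid[i]), which Pre_ guarantees
-- for every write A performs; pySetD/pyGetD are the PySem total forms)
def pvSetCell (g : List (List Int)) (i : Int) (c : Int) (v : Int) : List (List Int) :=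
  PySem.List.pySetD g i (PySem.List.pySetD (PySem.List.pyGetD g i []) c v)

def generate_warehouse (width : Int) (height : Int) (aisle_width : Int) (shelf_width : Int) : List (List Int) :=
  let grid : List (List Int) :=
    (PySem.List.pyRange 0 height 1).map (fun _ => List.replicate width.toNat (0 : Int))
  let period := aisle_width + shelf_width
  (PySem.List.pyRange aisle_width (width - aisle_width) period).foldl (fun grid j =>
    let grid :=
      (PySem.List.pyRange aisle_width (height - aisle_width) 1).foldl (fun grid i =>
        (PySem.List.pyRange 0 shelf_width 1).foldl (fun grid dj =>
          if j + dj < width then pvSetCell grid i (j + dj) 1 else grid) grid) grid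
    (PySem.List.pyRange (aisle_width + 5) (height - aisle_width) 10).foldl (fun grid i =>
      (PySem.List.pyRange 0 shelf_width 1).foldl (fun grid dj =>
        if j + dj < width ∧ i < height then pvSetCell grid i (j + dj) 0 else grid) grid) grid)
    grid

-- ===== PORT B =====
-- shelf_cols: the loop 'shelf_cols.update(range(j, min(j + shelf_width, width)))'
def pvShelfCols (width : Int) (aisle_width : Int) (shelf_width : Int) : PySem.Set Int :=
  (PySem.List.pyRange aisle_width (width - aisle_width) (aisle_width + shelf_width)).foldl
    (fun s j => PySem.Set.update s (PySem.List.pyRange j (min (j + shelf_width) width) 1))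
    PySem.Set.empty

def pvShelfRow (height : Int) (aisle_width : Int) (i : Int) : Bool :=
  decide (aisle_width ≤ i ∧ i < height - aisle_width) &&
  !(decide (aisle_width + 5 ≤ i) && (PySem.Int.mod (i - (aisle_width + 5)) 10 == 0))

def generate_warehouse_alt (width : Int) (height : Int) (aisle_width : Int) (shelf_width : Int) : List (List Int) :=
  let template : List Int :=
    if aisle_width < height - aisle_width then
      (PySem.List.pyRange 0 width 1).map
        (fun j => if PySem.Set.contains (pvShelfCols width aisle_width shelf_width) j then 1 else 0)
    else []
  (PySem.List.pyRange 0 height 1).map (fun i =>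
    if pvShelfRow height aisle_width i then template else List.replicate width.toNat 0)

-- ===== PRECONDITION & SPEC =====
-- Pre_ excludes exactly the inputs where A raises: period = 0 (range step 0, ValueError), and
-- negative aisle_width with the shelf loops actually writing (the row loop then reaches row
-- index height, IndexError).  It excludes no input on which A returns.
def Pre_generate_warehouse (width : Int) (height : Int) (aisle_width : Int) (shelf_width : Int) : Prop :=
  aisle_width + shelf_width ≠ 0 ∧
  (0 ≤ aisle_width ∨
    ¬(0 < aisle_width + shelf_width ∧ 1 ≤ shelf_width ∧ 2 * aisle_width < width ∧
      2 * aisle_width < height ∧ aisle_width < width))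
instance (width : Int) (height : Int) (aisle_width : Int) (shelf_width : Int) : Decidable (Pre_generate_warehouse width height aisle_width shelf_width) := by unfold Pre_generate_warehouse; infer_instance

def pvWitness_generate_warehouse : Int × Int × Int × Int := (12, 15, 3, 2)

def Spec_generate_warehouse (width : Int) (height : Int) (aisle_width : Int) (shelf_width : Int) (out : List (List Int)) : Prop := out = generate_warehouse_alt width height aisle_width shelf_width
instance (width : Int) (height : Int) (aisle_width : Int) (shelf_width : Int) (out : List (List Int)) : Decidable (Spec_generate_warehouse width height aisle_width shelf_width out) := by unfold Spec_generate_warehouse; infer_instance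

-- ===== CLAIM (what is proved, stated in full; the proofs are below) =====
def Claim_equal_generate_warehouse : Prop := ∀ (width : Int) (height : Int) (aisle_width : Int) (shelf_width : Int), Dom_generate_warehouse width height aisle_width shelf_width → Pre_generate_warehouse width height aisle_width shelf_width → Spec_generate_warehouse width height aisle_width shelf_width (generate_warehouse width height aisle_width shelf_width)

-- ===== LEMMAS AND PROOFS =====
def gridOf (w h : Int) (f : Int → Int → Int) : List (List Int) :=
  (PySem.List.pyRange 0 h 1).map (fun i => (PySem.List.pyRange 0 w 1).map (fun c => f i c))

theorem gridOf_congr {w h : Int} {f₁ f₂ : Int → Int → Int}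
    (hp : ∀ i, 0 ≤ i → i < h → ∀ c, 0 ≤ c → c < w → f₁ i c = f₂ i c) :
    gridOf w h f₁ = gridOf w h f₂ := by
  unfold gridOf
  refine List.map_congr_left (fun i hi => ?_)
  rw [PySem.List.mem_pyRange_one] at hi
  refine List.map_congr_left (fun c hc => ?_)
  rw [PySem.List.mem_pyRange_one] at hc
  exact hp i hi.1 hi.2 c hc.1 hc.2

theorem setCell_gridOf {w h : Int} {f : Int → Int → Int} {i c v : Int}
    (hi0 : 0 ≤ i) (hih : i < h) (hc0 : 0 ≤ c) (_hcw : c < w) :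
    pvSetCell (gridOf w h f) i c v =
      gridOf w h (fun i' c' => if i' = i ∧ c' = c then v else f i' c') := by
  unfold pvSetCell gridOf
  rw [PySem.List.pyGetD_map_pyRange_of_nonneg _ h i _ hi0 hih]
  rw [PySem.List.pySetD_of_nonneg _ _ hc0, PySem.List.pySetD_of_nonneg _ _ hi0]
  apply List.ext_getElem
  · simp [PySem.List.length_pyRange_one]
  · intro k hk hk'
    simp only [List.getElem_set]
    by_cases hki : i.toNat = k
    · simp only [if_pos hki]
      rw [List.getElem_map, PySem.List.getElem_pyRange_one]
      have e1 : (0 : Int) + (k : Int) = i := by omega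
      rw [e1]
      apply List.ext_getElem
      · simp
      · intro m hm hm'
        simp only [List.getElem_set, List.getElem_map, PySem.List.getElem_pyRange_one]
        by_cases hmc : c.toNat = m
        · have e2 : (0 : Int) + (m : Int) = c := by omega
          simp only [if_pos hmc, e2]
          simp
        · have e2 : (0 : Int) + (m : Int) ≠ c := by omega
          simp only [if_neg hmc]
          rw [if_neg (by rintro ⟨-, h2⟩; exact e2 h2)]
    · simp only [if_neg hki]
      rw [List.getElem_map, List.getElem_map, PySem.List.getElem_pyRange_one]
      have e1 : (0 : Int) + (k : Int) ≠ i := by omega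
      refine List.map_congr_left (fun c' _ => ?_)
      rw [if_neg (by rintro ⟨h1, -⟩; exact e1 h1)]

theorem djFold {w h : Int} {f : Int → Int → Int} {i j v : Int} (sw : Int) (hsw : 0 ≤ sw)
    (hi0 : 0 ≤ i) (hih : i < h) (hj : 0 ≤ j) :
    (PySem.List.pyRange 0 sw 1).foldl
        (fun g dj => if j + dj < w then pvSetCell g i (j + dj) v else g) (gridOf w h f)
      = gridOf w h (fun i' c => if i' = i ∧ j ≤ c ∧ c < j + sw ∧ c < w then v else f i' c) := by
  have key : ∀ (n : Nat) (f : Int → Int → Int),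
      (PySem.List.pyRange 0 (n : Int) 1).foldl
          (fun g dj => if j + dj < w then pvSetCell g i (j + dj) v else g) (gridOf w h f)
        = gridOf w h (fun i' c => if i' = i ∧ j ≤ c ∧ c < j + n ∧ c < w then v else f i' c) := by
    intro n
    induction n with
    | zero =>
      intro f
      rw [PySem.List.pyRange_one_eq_nil (by norm_num)]
      simp only [List.foldl_nil]
      apply gridOf_congr
      intro i' _ _ c _ _
      rw [if_neg (by rintro ⟨-, h1, h2, -⟩; omega)]
    | succ n ih =>
      intro f
      have hc : ((n : Int) + 1) = ((n + 1 : Nat) : Int) := by push_cast; ring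
      rw [← hc, PySem.List.pyRange_one_succ_right (by positivity)]
      rw [List.foldl_append, ih f]
      simp only [List.foldl_cons, List.foldl_nil]
      by_cases hw : j + n < w
      · rw [if_pos hw, setCell_gridOf hi0 hih (by omega) hw]
        apply gridOf_congr
        intro i' _ _ c _ _
        by_cases h1 : i' = i ∧ c = j + n
        · rw [if_pos h1, if_pos (by obtain ⟨a, b⟩ := h1; exact ⟨a, by omega, by omega, by omega⟩)]
        · rw [if_neg h1]
          by_cases h2 : i' = i ∧ j ≤ c ∧ c < j + n ∧ c < w
          · rw [if_pos h2, if_pos ⟨h2.1, h2.2.1, by omega, h2.2.2.2⟩]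
          · rw [if_neg h2]
            rw [if_neg ?_]
            rintro ⟨a, b, c2, d⟩
            by_cases hc3 : c = j + n
            · exact h1 ⟨a, hc3⟩
            · exact h2 ⟨a, b, by omega, d⟩
      · rw [if_neg hw]
        apply gridOf_congr
        intro i' _ _ c _ _
        by_cases h2 : i' = i ∧ j ≤ c ∧ c < j + n ∧ c < w
        · rw [if_pos h2, if_pos (by obtain ⟨a, b, c', d⟩ := h2; exact ⟨a, b, by omega, d⟩)]
        · rw [if_neg h2, if_neg (by rintro ⟨a, b, c', d⟩; exact h2 ⟨a, b, by omega, d⟩)]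
  have := key sw.toNat f
  rw [Int.toNat_of_nonneg hsw] at this
  exact this

theorem rowsFold {w h : Int} {f : Int → Int → Int} {j v sw : Int} (L : List Int)
    (hL : ∀ i ∈ L, 0 ≤ i ∧ i < h) (hsw : 0 ≤ sw) (hj : 0 ≤ j) :
    L.foldl (fun g i => (PySem.List.pyRange 0 sw 1).foldl
        (fun g dj => if j + dj < w then pvSetCell g i (j + dj) v else g) g) (gridOf w h f)
      = gridOf w h (fun i' c => if i' ∈ L ∧ j ≤ c ∧ c < j + sw ∧ c < w then v else f i' c) := by
  induction L generalizing f with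
  | nil =>
    simp only [List.foldl_nil]
    apply gridOf_congr
    intro i' _ _ c _ _
    rw [if_neg (by rintro ⟨hm, -⟩; exact (List.not_mem_nil).elim hm)]
  | cons i L ih =>
    simp only [List.foldl_cons]
    rw [djFold sw hsw (hL i (List.mem_cons_self)).1 (hL i (List.mem_cons_self)).2 hj]
    rw [ih (fun x hx => hL x (List.mem_cons_of_mem _ hx))]
    apply gridOf_congr
    intro i' _ _ c _ _
    by_cases h2 : i' ∈ L ∧ j ≤ c ∧ c < j + sw ∧ c < w
    · rw [if_pos h2, if_pos ⟨List.mem_cons_of_mem _ h2.1, h2.2⟩]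
    · rw [if_neg h2]
      by_cases h1 : i' = i ∧ j ≤ c ∧ c < j + sw ∧ c < w
      · rw [if_pos h1, if_pos ⟨by rw [h1.1]; exact List.mem_cons_self, h1.2⟩]
      · rw [if_neg h1]
        rw [if_neg ?_]
        rintro ⟨hm, hcols⟩
        rcases List.mem_cons.mp hm with he | hm'
        · exact h1 ⟨he, hcols⟩
        · exact h2 ⟨hm', hcols⟩

theorem outerFold {w h aw sw : Int} (haw : 0 ≤ aw) (hsw : 0 ≤ sw) :
    ∀ (S : List Int) (f : Int → Int → Int), (∀ jb ∈ S, 0 ≤ jb) →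
    S.foldl (fun g j =>
        let g2 := (PySem.List.pyRange aw (h - aw) 1).foldl (fun g i =>
          (PySem.List.pyRange 0 sw 1).foldl
            (fun g dj => if j + dj < w then pvSetCell g i (j + dj) 1 else g) g) g
        (PySem.List.pyRange (aw + 5) (h - aw) 10).foldl (fun g i =>
          (PySem.List.pyRange 0 sw 1).foldl
            (fun g dj => if j + dj < w ∧ i < h then pvSetCell g i (j + dj) 0 else g) g) g2)
      (gridOf w h f)
    = gridOf w h (fun i c =>
        if (∃ jb ∈ S, jb ≤ c ∧ c < jb + sw ∧ c < w) ∧ i ∈ PySem.List.pyRange aw (h - aw) 1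
        then (if i ∈ PySem.List.pyRange (aw + 5) (h - aw) 10 then 0 else 1)
        else f i c) := by
  have hL1 : ∀ i ∈ PySem.List.pyRange aw (h - aw) 1, 0 ≤ i ∧ i < h := by
    intro i hi; rw [PySem.List.mem_pyRange_one] at hi; omega
  have hL2 : ∀ i ∈ PySem.List.pyRange (aw + 5) (h - aw) 10, 0 ≤ i ∧ i < h := by
    intro i hi
    rw [PySem.List.mem_pyRange_iff_of_pos (by norm_num)] at hi
    omega
  have hsub : ∀ i, i ∈ PySem.List.pyRange (aw + 5) (h - aw) 10 →
      i ∈ PySem.List.pyRange aw (h - aw) 1 := by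
    intro i hi
    rw [PySem.List.mem_pyRange_iff_of_pos (by norm_num)] at hi
    rw [PySem.List.mem_pyRange_one]
    omega
  intro S
  induction S with
  | nil =>
    intro f _
    simp only [List.foldl_nil]
    apply gridOf_congr
    intro i' _ _ c _ _
    rw [if_neg (by rintro ⟨⟨jb, hm, -⟩, -⟩; exact (List.not_mem_nil).elim hm)]
  | cons j S ih =>
    intro f hS
    have hj : 0 ≤ j := hS j List.mem_cons_self
    simp only [List.foldl_cons]
    have hcross : ∀ (g : List (List Int)),
        (PySem.List.pyRange (aw + 5) (h - aw) 10).foldl (fun g i =>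
          (PySem.List.pyRange 0 sw 1).foldl
            (fun g dj => if j + dj < w ∧ i < h then pvSetCell g i (j + dj) 0 else g) g) g
        = (PySem.List.pyRange (aw + 5) (h - aw) 10).foldl (fun g i =>
          (PySem.List.pyRange 0 sw 1).foldl
            (fun g dj => if j + dj < w then pvSetCell g i (j + dj) 0 else g) g) g := by
      intro g
      apply PySem.List.foldl_congr_mem
      intro acc x hx
      apply PySem.List.foldl_congr_mem
      intro acc2 y _
      rw [if_congr (and_iff_left (hL2 x hx).2) rfl rfl]
    rw [hcross]
    rw [rowsFold _ hL1 hsw hj, rowsFold _ hL2 hsw hj,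
        ih _ (fun x hx => hS x (List.mem_cons_of_mem _ hx))]
    apply gridOf_congr
    intro i _ _ c _ _
    by_cases hE : (∃ jb ∈ S, jb ≤ c ∧ c < jb + sw ∧ c < w) ∧
        i ∈ PySem.List.pyRange aw (h - aw) 1
    · have hE' : (∃ jb ∈ j :: S, jb ≤ c ∧ c < jb + sw ∧ c < w) ∧
          i ∈ PySem.List.pyRange aw (h - aw) 1 :=
        ⟨⟨hE.1.choose, List.mem_cons_of_mem _ hE.1.choose_spec.1, hE.1.choose_spec.2⟩, hE.2⟩
      rw [if_pos hE, if_pos hE']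
    · rw [if_neg hE]
      by_cases hX : i ∈ PySem.List.pyRange (aw + 5) (h - aw) 10 ∧
          j ≤ c ∧ c < j + sw ∧ c < w
      · have hX' : (∃ jb ∈ j :: S, jb ≤ c ∧ c < jb + sw ∧ c < w) ∧
            i ∈ PySem.List.pyRange aw (h - aw) 1 :=
          ⟨⟨j, List.mem_cons_self, hX.2⟩, hsub i hX.1⟩
        rw [if_pos hX, if_pos hX', if_pos hX.1]
      · rw [if_neg hX]
        by_cases hR : i ∈ PySem.List.pyRange aw (h - aw) 1 ∧ j ≤ c ∧ c < j + sw ∧ c < w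
        · have hR' : (∃ jb ∈ j :: S, jb ≤ c ∧ c < jb + sw ∧ c < w) ∧
              i ∈ PySem.List.pyRange aw (h - aw) 1 :=
            ⟨⟨j, List.mem_cons_self, hR.2⟩, hR.1⟩
          have hXn : ¬ i ∈ PySem.List.pyRange (aw + 5) (h - aw) 10 :=
            fun hx => hX ⟨hx, hR.2⟩
          rw [if_pos hR, if_pos hR', if_neg hXn]
        · rw [if_neg hR]
          rw [if_neg ?_]
          rintro ⟨⟨jb, hm, hcols⟩, hRi⟩
          rcases List.mem_cons.mp hm with he | hm'
          · exact hR ⟨hRi, he ▸ hcols⟩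
          · exact hE ⟨⟨jb, hm', hcols⟩, hRi⟩

theorem mem_colsFold {w sw : Int} (S : List Int) (s0 : PySem.Set Int) (y : Int) :
    (y ∈ S.foldl (fun s j =>
        PySem.Set.update s (PySem.List.pyRange j (min (j + sw) w) 1)) s0)
      ↔ y ∈ s0 ∨ ∃ j ∈ S, j ≤ y ∧ y < j + sw ∧ y < w := by
  induction S generalizing s0 with
  | nil => simp
  | cons j S ih =>
    simp only [List.foldl_cons]
    rw [ih, PySem.Set.mem_update, PySem.List.mem_pyRange_one]
    constructor
    · rintro ((hs | ⟨h1, h2⟩) | ⟨jb, hm, hc⟩)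
      · exact Or.inl hs
      · exact Or.inr ⟨j, List.mem_cons_self, h1, by omega, by omega⟩
      · exact Or.inr ⟨jb, List.mem_cons_of_mem _ hm, hc⟩
    · rintro (hs | ⟨jb, hm, hc⟩)
      · exact Or.inl (Or.inl hs)
      · rcases List.mem_cons.mp hm with he | hm'
        · exact Or.inl (Or.inr ⟨he ▸ hc.1, by subst he; omega⟩)
        · exact Or.inr ⟨jb, hm', hc⟩

theorem contains_shelfCols {w aw sw : Int} (c : Int) :
    PySem.Set.contains (pvShelfCols w aw sw) c = true ↔
      ∃ jb ∈ PySem.List.pyRange aw (w - aw) (aw + sw),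
        jb ≤ c ∧ c < jb + sw ∧ c < w := by
  unfold pvShelfCols
  rw [PySem.Set.contains_iff, mem_colsFold]
  constructor
  · rintro (hc | he)
    · simp [PySem.Set.empty] at hc
    · exact he
  · exact Or.inr

theorem grid0_eq (w h : Int) :
    (PySem.List.pyRange 0 h 1).map (fun _ => List.replicate w.toNat (0 : Int)) =
      gridOf w h (fun _ _ => 0) := by
  unfold gridOf
  refine List.map_congr_left (fun i _ => ?_)
  rw [List.map_const', PySem.List.length_pyRange_one]
  norm_num

theorem alt_eq_gridOf (w h aw sw : Int) :
    generate_warehouse_alt w h aw sw = gridOf w h (fun i c =>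
      if PySem.Set.contains (pvShelfCols w aw sw) c && pvShelfRow h aw i then 1 else 0) := by
  unfold generate_warehouse_alt gridOf
  simp only []
  refine List.map_congr_left (fun i _ => ?_)
  by_cases hr : pvShelfRow h aw i = true
  · have hg : aw < h - aw := by
      unfold pvShelfRow at hr
      have h2 := of_decide_eq_true ((Bool.and_eq_true _ _).mp hr).1
      omega
    rw [if_pos hr, if_pos hg]
    refine List.map_congr_left (fun c _ => ?_)
    rw [hr, Bool.and_true]
  · rw [if_neg hr]
    have hr' : pvShelfRow h aw i = false := by
      revert hr; cases pvShelfRow h aw i <;> simp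
    rw [hr']
    simp only [Bool.and_false]
    rw [List.map_congr_left (fun c _ => if_neg (by simp))]
    rw [List.map_const', PySem.List.length_pyRange_one]
    norm_num

theorem main_eq (w h aw sw : Int)
    (hne : aw + sw ≠ 0)
    (hk : 0 ≤ aw ∨ ¬(0 < aw + sw ∧ 1 ≤ sw ∧ 2 * aw < w ∧ 2 * aw < h ∧ aw < w)) :
    generate_warehouse w h aw sw = generate_warehouse_alt w h aw sw := by
  rw [alt_eq_gridOf]
  unfold generate_warehouse
  simp only []
  rw [grid0_eq w h]
  by_cases hsw0 : sw ≤ 0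
  · have hcont : ∀ c : Int, PySem.Set.contains (pvShelfCols w aw sw) c = false := by
      intro c
      rw [← Bool.not_eq_true, contains_shelfCols]
      rintro ⟨jb, -, h1, h2, -⟩
      omega
    simp only [PySem.List.pyRange_one_eq_nil hsw0, List.foldl_nil, List.foldl_fixed]
    unfold gridOf
    refine List.map_congr_left (fun i _ => ?_)
    refine List.map_congr_left (fun c _ => ?_)
    show (0:Int) = if (PySem.Set.contains (pvShelfCols w aw sw) c && pvShelfRow h aw i) = true
      then 1 else 0
    rw [hcont c]
    simp
  · have hsw1 : 1 ≤ sw := by omega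
    have hsw' : 0 ≤ sw := by omega
    by_cases hperneg : aw + sw < 0
    · -- descending outer range; every start exceeds w, so the j+dj < w guard always fails
      have hstep : ∀ jb ∈ PySem.List.pyRange aw (w - aw) (aw + sw), w < jb := by
        intro jb hm
        rw [PySem.List.mem_pyRange_iff_of_neg hperneg] at hm
        omega
      have hB : ∀ (acc : List (List Int)), ∀ j ∈ PySem.List.pyRange aw (w - aw) (aw + sw),
          (PySem.List.pyRange (aw + 5) (h - aw) 10).foldl (fun g i =>
            (PySem.List.pyRange 0 sw 1).foldl (fun g dj =>
              if j + dj < w ∧ i < h then pvSetCell g i (j + dj) 0 else g) g)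
          ((PySem.List.pyRange aw (h - aw) 1).foldl (fun g i =>
            (PySem.List.pyRange 0 sw 1).foldl (fun g dj =>
              if j + dj < w then pvSetCell g i (j + dj) 1 else g) g) acc) = acc := by
        intro acc j hj
        have hjw : w < j := hstep j hj
        have h1 : ∀ (i : Int) (acc2 : List (List Int)),
            (PySem.List.pyRange 0 sw 1).foldl (fun g dj =>
              if j + dj < w then pvSetCell g i (j + dj) (1:Int) else g) acc2 = acc2 := by
          intro i acc2
          rw [PySem.List.foldl_congr_mem _ _ (fun g _ => g) _ ?_, List.foldl_fixed]
          intro a dj hdj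
          rw [PySem.List.mem_pyRange_one] at hdj
          rw [if_neg (by omega)]
        have h0 : ∀ (i : Int) (acc2 : List (List Int)),
            (PySem.List.pyRange 0 sw 1).foldl (fun g dj =>
              if j + dj < w ∧ i < h then pvSetCell g i (j + dj) (0:Int) else g) acc2 = acc2 := by
          intro i acc2
          rw [PySem.List.foldl_congr_mem _ _ (fun g _ => g) _ ?_, List.foldl_fixed]
          intro a dj hdj
          rw [PySem.List.mem_pyRange_one] at hdj
          rw [if_neg (by rintro ⟨hc1, -⟩; omega)]
        rw [PySem.List.foldl_congr_mem _ _ (fun g _ => g) _ (fun a x _ => h1 x a),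
          List.foldl_fixed,
          PySem.List.foldl_congr_mem _ _ (fun g _ => g) _ (fun a x _ => h0 x a),
          List.foldl_fixed]
      rw [PySem.List.foldl_congr_mem _ _ (fun g _ => g) _ hB, List.foldl_fixed]
      have hcont : ∀ c : Int, PySem.Set.contains (pvShelfCols w aw sw) c = false := by
        intro c
        rw [← Bool.not_eq_true, contains_shelfCols]
        rintro ⟨jb, hm, hc1, -, hc3⟩
        exact absurd hc3 (by have := hstep jb hm; omega)
      show gridOf w h (fun _ _ => 0) = gridOf w h (fun i c =>
        if PySem.Set.contains (pvShelfCols w aw sw) c && pvShelfRow h aw i then 1 else 0)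
      apply gridOf_congr
      intro i _ _ c _ _
      rw [hcont c]
      simp
    · have hper : 0 < aw + sw := by omega
      by_cases hw2 : w ≤ 2 * aw
      · -- empty outer range: no shelf blocks at all
        have hS : PySem.List.pyRange aw (w - aw) (aw + sw) = [] := by
          rw [PySem.List.pyRange_of_pos _ _ hper, if_neg (by omega)]
          simp
        rw [hS]
        simp only [List.foldl_nil]
        have hcont : ∀ c : Int, PySem.Set.contains (pvShelfCols w aw sw) c = false := by
          intro c
          rw [← Bool.not_eq_true, contains_shelfCols]
          rintro ⟨jb, hm, -⟩
          rw [hS] at hm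
          exact (List.not_mem_nil).elim hm
        show gridOf w h (fun _ _ => 0) = gridOf w h (fun i c =>
          if PySem.Set.contains (pvShelfCols w aw sw) c && pvShelfRow h aw i then 1 else 0)
        apply gridOf_congr
        intro i _ _ c _ _
        rw [hcont c]
        simp
      · by_cases hh2 : h ≤ 2 * aw
        · -- no shelf rows: both row ranges are empty and the row predicate is everywhere false
          have hL1 : PySem.List.pyRange aw (h - aw) 1 = [] :=
            PySem.List.pyRange_one_eq_nil (by omega)
          have hL2 : PySem.List.pyRange (aw + 5) (h - aw) 10 = [] := by
            rw [PySem.List.pyRange_of_pos _ _ (by norm_num : (0:Int) < 10), if_neg (by omega)]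
            simp
          rw [hL1, hL2]
          simp only [List.foldl_nil, List.foldl_fixed]
          have hrow : ∀ i : Int, pvShelfRow h aw i = false := by
            intro i
            unfold pvShelfRow
            rw [decide_eq_false (by omega)]
            simp
          show gridOf w h (fun _ _ => 0) = gridOf w h (fun i c =>
            if PySem.Set.contains (pvShelfCols w aw sw) c && pvShelfRow h aw i then 1 else 0)
          apply gridOf_congr
          intro i _ _ c _ _
          rw [hrow i]
          simp
        · by_cases hwa : w ≤ aw
          · -- every start is ≥ w: the j+dj < w guard always fails
            have hstep : ∀ jb ∈ PySem.List.pyRange aw (w - aw) (aw + sw), w ≤ jb := by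
              intro jb hm
              rw [PySem.List.mem_pyRange_iff_of_pos hper] at hm
              omega
            have hB : ∀ (acc : List (List Int)), ∀ j ∈ PySem.List.pyRange aw (w - aw) (aw + sw),
                (PySem.List.pyRange (aw + 5) (h - aw) 10).foldl (fun g i =>
                  (PySem.List.pyRange 0 sw 1).foldl (fun g dj =>
                    if j + dj < w ∧ i < h then pvSetCell g i (j + dj) 0 else g) g)
                ((PySem.List.pyRange aw (h - aw) 1).foldl (fun g i =>
                  (PySem.List.pyRange 0 sw 1).foldl (fun g dj =>
                    if j + dj < w then pvSetCell g i (j + dj) 1 else g) g) acc) = acc := by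
              intro acc j hj
              have hjw : w ≤ j := hstep j hj
              have h1 : ∀ (i : Int) (acc2 : List (List Int)),
                  (PySem.List.pyRange 0 sw 1).foldl (fun g dj =>
                    if j + dj < w then pvSetCell g i (j + dj) (1:Int) else g) acc2 = acc2 := by
                intro i acc2
                rw [PySem.List.foldl_congr_mem _ _ (fun g _ => g) _ ?_, List.foldl_fixed]
                intro a dj hdj
                rw [PySem.List.mem_pyRange_one] at hdj
                rw [if_neg (by omega)]
              have h0 : ∀ (i : Int) (acc2 : List (List Int)),
                  (PySem.List.pyRange 0 sw 1).foldl (fun g dj =>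
                    if j + dj < w ∧ i < h then pvSetCell g i (j + dj) (0:Int) else g) acc2 = acc2 := by
                intro i acc2
                rw [PySem.List.foldl_congr_mem _ _ (fun g _ => g) _ ?_, List.foldl_fixed]
                intro a dj hdj
                rw [PySem.List.mem_pyRange_one] at hdj
                rw [if_neg (by rintro ⟨hc1, -⟩; omega)]
              rw [PySem.List.foldl_congr_mem _ _ (fun g _ => g) _ (fun a x _ => h1 x a),
                List.foldl_fixed,
                PySem.List.foldl_congr_mem _ _ (fun g _ => g) _ (fun a x _ => h0 x a),
                List.foldl_fixed]
            rw [PySem.List.foldl_congr_mem _ _ (fun g _ => g) _ hB, List.foldl_fixed]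
            have hcont : ∀ c : Int, PySem.Set.contains (pvShelfCols w aw sw) c = false := by
              intro c
              rw [← Bool.not_eq_true, contains_shelfCols]
              rintro ⟨jb, hm, hc1, -, hc3⟩
              exact absurd hc3 (by have := hstep jb hm; omega)
            show gridOf w h (fun _ _ => 0) = gridOf w h (fun i c =>
              if PySem.Set.contains (pvShelfCols w aw sw) c && pvShelfRow h aw i then 1 else 0)
            apply gridOf_congr
            intro i _ _ c _ _
            rw [hcont c]
            simp
          · -- main case: aw ≥ 0 and the shelves are really painted
            have haw : 0 ≤ aw := by
              rcases hk with h0 | hW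
              · exact h0
              · exact absurd ⟨hper, hsw1, by omega, by omega, by omega⟩ hW
            have hS0 : ∀ jb ∈ PySem.List.pyRange aw (w - aw) (aw + sw), 0 ≤ jb := by
              intro jb hm
              rw [PySem.List.mem_pyRange_iff_of_pos hper] at hm
              omega
            rw [outerFold haw hsw' _ _ hS0]
            show _ = gridOf w h (fun i c =>
              if PySem.Set.contains (pvShelfCols w aw sw) c && pvShelfRow h aw i then 1 else 0)
            apply gridOf_congr
            intro i hi0 hih c hc0 hcw
            have hcol : PySem.Set.contains (pvShelfCols w aw sw) c = true ↔
                ∃ jb ∈ PySem.List.pyRange aw (w - aw) (aw + sw),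
                  jb ≤ c ∧ c < jb + sw ∧ c < w := by
              exact contains_shelfCols c
            by_cases hr : aw ≤ i ∧ i < h - aw
            · by_cases hx : aw + 5 ≤ i ∧ (10:Int) ∣ (i - (aw + 5))
              · -- cross-aisle row: both sides give 0
                have hmem2 : i ∈ PySem.List.pyRange (aw + 5) (h - aw) 10 := by
                  rw [PySem.List.mem_pyRange_iff_of_pos (by norm_num)]
                  exact ⟨hx.1, by omega, hx.2⟩
                have hrowf : pvShelfRow h aw i = false := by
                  unfold pvShelfRow
                  rw [decide_eq_true hr, decide_eq_true hx.1]
                  have : PySem.Int.mod (i - (aw + 5)) 10 = 0 :=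
                    (PySem.Int.mod_eq_zero_iff_dvd _ _).mpr hx.2
                  rw [this]
                  simp
                rw [hrowf]
                by_cases hE : (∃ jb ∈ PySem.List.pyRange aw (w - aw) (aw + sw),
                    jb ≤ c ∧ c < jb + sw ∧ c < w) ∧ i ∈ PySem.List.pyRange aw (h - aw) 1
                · rw [if_pos hE, if_pos hmem2]
                  simp
                · rw [if_neg hE]
                  simp
              · -- shelf row that is not a cross aisle
                have hmem1 : i ∈ PySem.List.pyRange aw (h - aw) 1 := by
                  rw [PySem.List.mem_pyRange_one]
                  exact hr
                have hmem2 : i ∉ PySem.List.pyRange (aw + 5) (h - aw) 10 := by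
                  rw [PySem.List.mem_pyRange_iff_of_pos (by norm_num)]
                  rintro ⟨ha1, -, ha3⟩
                  exact hx ⟨ha1, ha3⟩
                have hrowt : pvShelfRow h aw i = true := by
                  unfold pvShelfRow
                  rw [decide_eq_true hr]
                  by_cases hx5 : aw + 5 ≤ i
                  · have hd : ¬ (10:Int) ∣ (i - (aw + 5)) := fun hd => hx ⟨hx5, hd⟩
                    simp [decide_eq_true hx5, hd]
                  · simp [decide_eq_false hx5]
                rw [hrowt]
                simp only [Bool.and_true]
                by_cases hE : ∃ jb ∈ PySem.List.pyRange aw (w - aw) (aw + sw),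
                    jb ≤ c ∧ c < jb + sw ∧ c < w
                · rw [if_pos ⟨hE, hmem1⟩, if_neg hmem2, if_pos (hcol.mpr hE)]
                · rw [if_neg (by rintro ⟨he, -⟩; exact hE he),
                    if_neg (by rw [hcol]; exact hE)]
            · -- not a shelf row at all
              have hmem1 : i ∉ PySem.List.pyRange aw (h - aw) 1 := by
                rw [PySem.List.mem_pyRange_one]
                exact hr
              have hrowf : pvShelfRow h aw i = false := by
                unfold pvShelfRow
                rw [decide_eq_false hr]
                simp
              rw [hrowf]
              rw [if_neg (by rintro ⟨-, hm⟩; exact hmem1 hm)]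
              simp

-- ===== VERDICT (by name: the statement is the Claim_ definition above) =====
theorem generate_warehouse_spec : Claim_equal_generate_warehouse := by
  unfold Claim_equal_generate_warehouse
  intro width height aisle_width shelf_width _ hpre
  unfold Spec_generate_warehouse
  exact main_eq width height aisle_width shelf_width hpre.1 hpre.2
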